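-- pv_equiv track=rewrite | github.com/sharathkumar49/learning | Python programs/LeetCodeSolutions/2200.FindAllKDistantIndicesinanArray.py | findKDistantIndices
-- ===== SOURCE A (Python) =====
-- def findKDistantIndices(nums, key, k):
--     res = set()
--     n = len(nums)
--     for i, x in enumerate(nums):
--         if x == key:
--             for j in range(max(0, i-k), min(n, i+k+1)):
--                 res.add(j)
--     return sorted(res)
-- ===== SOURCE B (Python) =====
-- def findKDistantIndices(nums, key, k):
--     pos = [i for i, x in enumerate(nums) if x == key]
--     m = len(pos)
--     res = []
--     p = 0
--     for j in range(len(nums)):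
--         while p < m and pos[p] < j - k:
--             p += 1
--         if p < m and pos[p] <= j + k:
--             res.append(j)
--     return res
-- ===== Notes on version B (the rewrite author's own statement) =====
-- stated objective: alternative
-- what changed: Replaced the per-occurrence inner range loop into a set plus a final sort by a single two-pointer sweep: key positions are collected once and each index j is emitted in increasing order by comparing against the current candidate position, so no set and no sort are needed.
import Mathlib
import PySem

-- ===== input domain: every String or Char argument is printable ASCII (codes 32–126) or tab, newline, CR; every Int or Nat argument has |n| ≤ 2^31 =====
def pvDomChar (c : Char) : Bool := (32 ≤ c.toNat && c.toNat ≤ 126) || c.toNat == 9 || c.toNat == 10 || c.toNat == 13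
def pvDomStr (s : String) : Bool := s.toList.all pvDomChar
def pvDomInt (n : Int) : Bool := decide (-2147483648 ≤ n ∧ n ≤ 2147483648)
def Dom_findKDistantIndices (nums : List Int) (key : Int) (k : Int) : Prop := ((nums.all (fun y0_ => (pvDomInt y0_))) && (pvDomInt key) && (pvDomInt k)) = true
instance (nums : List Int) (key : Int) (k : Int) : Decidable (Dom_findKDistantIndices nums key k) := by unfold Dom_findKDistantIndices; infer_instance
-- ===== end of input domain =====

-- B replaces A's per-occurrence inner loop into a set plus a final sort by a
-- two-pointer sweep over collected key positions, emitting indices in increasing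
-- order directly (objective: alternative; the return values are proved equal).

-- ===== PORT A =====
def findKDistantIndices (nums : List Int) (key : Int) (k : Int) : List Int :=
  let n : Int := nums.length
  let res : PySem.Set Int :=
    (PySem.List.enumerate nums).foldl
      (fun res q =>
        if q.2 == key then
          (PySem.List.pyRange (max 0 (q.1 - k)) (min n (q.1 + k + 1)) 1).foldl
            (fun r j => PySem.Set.add r j) res
        else res)
      PySem.Set.empty
  PySem.List.sorted res (fun x => x) false

-- ===== PORT B =====
-- the 'while p < m and pos[p] < j - k: p += 1' loop of Source B
def bAdvance (pos : List Int) (t : Int) (p : Nat) : Nat :=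
  if h : p < pos.length then
    if pos[p] < t then bAdvance pos t (p + 1) else p
  else p
termination_by pos.length - p

def findKDistantIndices_alt (nums : List Int) (key : Int) (k : Int) : List Int :=
  let pos : List Int :=
    ((PySem.List.enumerate nums).filter (fun q => q.2 == key)).map (fun q => q.1)
  let st :=
    (PySem.List.pyRange 0 (nums.length : Int) 1).foldl
      (fun (st : Nat × List Int) j =>
        let p := bAdvance pos (j - k) st.1
        if h : p < pos.length then           -- p < m
          if pos[p] ≤ j + k then (p, st.2 ++ [j]) else (p, st.2)
        else (p, st.2))
      (0, ([] : List Int))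
  st.2

-- ===== PRECONDITION & SPEC =====
def Spec_findKDistantIndices (nums : List Int) (key : Int) (k : Int) (out : List Int) : Prop := out = findKDistantIndices_alt nums key k
instance (nums : List Int) (key : Int) (k : Int) (out : List Int) : Decidable (Spec_findKDistantIndices nums key k out) := by unfold Spec_findKDistantIndices; infer_instance

-- ===== CLAIM (what is proved, stated in full; the proofs are below) =====
def Claim_equal_findKDistantIndices : Prop := ∀ (nums : List Int) (key : Int) (k : Int), Dom_findKDistantIndices nums key k → Spec_findKDistantIndices nums key k (findKDistantIndices nums key k)

-- ===== LEMMAS AND PROOFS =====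

-- the list of key positions, and the canonical answer both programs compute
def posOf (nums : List Int) (key : Int) : List Int :=
  ((PySem.List.enumerate nums).filter (fun q => q.2 == key)).map (fun q => q.1)

def near (pos : List Int) (k j : Int) : Bool :=
  pos.any (fun i => decide (j - k ≤ i) && decide (i ≤ j + k))

def canon (nums : List Int) (key : Int) (k : Int) : List Int :=
  (PySem.List.pyRange 0 (nums.length : Int) 1).filter (near (posOf nums key) k)

lemma mem_posOf (nums : List Int) (key i : Int) :
    i ∈ posOf nums key ↔ ∃ q ∈ PySem.List.enumerate nums 0, q.2 = key ∧ q.1 = i := by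
  simp only [posOf, List.mem_map, List.mem_filter, beq_iff_eq, Prod.exists]
  constructor
  · rintro ⟨a, b, ⟨hm, hk⟩, hi⟩; exact ⟨a, b, hm, hk, hi⟩
  · rintro ⟨a, b, hm, hk, hi⟩; exact ⟨a, b, ⟨hm, hk⟩, hi⟩

lemma pairwise_lt_posOf (nums : List Int) (key : Int) :
    (posOf nums key).Pairwise (· < ·) := by
  have h := PySem.List.pairwise_lt_enumerate nums (0 : Int)
  exact List.pairwise_map.mpr ((h.filter _).imp (fun h => h))

lemma near_iff (pos : List Int) (k j : Int) :
    near pos k j = true ↔ ∃ i ∈ pos, j - k ≤ i ∧ i ≤ j + k := by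
  simp [near, List.any_eq_true]

-- A's fold builds (as a nodup list) exactly the set of indices near some key position
lemma foldA_spec (key k n : Int) (l : List (Int × Int)) :
    ∀ (s : PySem.Set Int), s.Nodup →
      ((l.foldl
        (fun res q =>
          if q.2 == key then
            (PySem.List.pyRange (max 0 (q.1 - k)) (min n (q.1 + k + 1)) 1).foldl
              (fun r j => PySem.Set.add r j) res
          else res) s).Nodup ∧
      ∀ j, j ∈ (l.foldl
        (fun res q =>
          if q.2 == key then
            (PySem.List.pyRange (max 0 (q.1 - k)) (min n (q.1 + k + 1)) 1).foldl
              (fun r j => PySem.Set.add r j) res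
          else res) s) ↔
        j ∈ s ∨ ∃ q ∈ l, q.2 = key ∧ max 0 (q.1 - k) ≤ j ∧ j < min n (q.1 + k + 1)) := by
  induction l with
  | nil => intro s hs; simpa using hs
  | cons x xs ih =>
    intro s hs
    simp only [List.foldl_cons]
    by_cases hx : x.2 = key
    · have hupd : ((PySem.List.pyRange (max 0 (x.1 - k)) (min n (x.1 + k + 1)) 1).foldl
          (fun r j => PySem.Set.add r j) s)
          = PySem.Set.update s (PySem.List.pyRange (max 0 (x.1 - k)) (min n (x.1 + k + 1)) 1) := rfl
      rw [if_pos (by simpa using hx), hupd]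
      obtain ⟨hn, hm⟩ := ih _ (PySem.Set.nodup_update s _ hs)
      refine ⟨hn, fun j => ?_⟩
      rw [hm j, PySem.Set.mem_update, PySem.List.mem_pyRange_one]
      constructor
      · rintro ((h | h) | h)
        · exact Or.inl h
        · exact Or.inr ⟨x, List.mem_cons_self, hx, h⟩
        · obtain ⟨q, hq, h1, h2⟩ := h
          exact Or.inr ⟨q, List.mem_cons_of_mem _ hq, h1, h2⟩
      · rintro (h | ⟨q, hq, h1, h2⟩)
        · exact Or.inl (Or.inl h)
        · rcases List.mem_cons.mp hq with rfl | hq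
          · exact Or.inl (Or.inr h2)
          · exact Or.inr ⟨q, hq, h1, h2⟩
    · rw [if_neg (by simpa using hx)]
      obtain ⟨hn, hm⟩ := ih _ hs
      refine ⟨hn, fun j => ?_⟩
      rw [hm j]
      constructor
      · rintro (h | ⟨q, hq, h1, h2⟩)
        · exact Or.inl h
        · exact Or.inr ⟨q, List.mem_cons_of_mem _ hq, h1, h2⟩
      · rintro (h | ⟨q, hq, h1, h2⟩)
        · exact Or.inl h
        · rcases List.mem_cons.mp hq with rfl | hq
          · exact absurd h1 hx
          · exact Or.inr ⟨q, hq, h1, h2⟩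

lemma mem_canon (nums : List Int) (key k j : Int) :
    j ∈ canon nums key k ↔
      (0 ≤ j ∧ j < (nums.length : Int)) ∧ near (posOf nums key) k j = true := by
  simp [canon, List.mem_filter, PySem.List.mem_pyRange_one, and_assoc]

lemma nodup_canon (nums : List Int) (key k : Int) : (canon nums key k).Nodup :=
  (PySem.List.nodup_pyRange_one 0 (nums.length : Int)).filter _

lemma pairwise_canon (nums : List Int) (key k : Int) :
    (canon nums key k).Pairwise (· < ·) :=
  (PySem.List.pairwise_lt_pyRange_one 0 (nums.length : Int)).filter _

-- the two membership conditions coincide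
lemma cond_iff (nums : List Int) (key k j : Int) :
    (∃ q ∈ PySem.List.enumerate nums 0, q.2 = key ∧
        max 0 (q.1 - k) ≤ j ∧ j < min (nums.length : Int) (q.1 + k + 1)) ↔
      ((0 ≤ j ∧ j < (nums.length : Int)) ∧ near (posOf nums key) k j = true) := by
  rw [near_iff]
  constructor
  · rintro ⟨q, hq, hk, h1, h2⟩
    refine ⟨⟨by omega, by omega⟩, q.1, (mem_posOf nums key q.1).mpr ⟨q, hq, hk, rfl⟩, by omega, by omega⟩
  · rintro ⟨⟨h0, hn⟩, i, hi, h1, h2⟩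
    obtain ⟨q, hq, hk, rfl⟩ := (mem_posOf nums key i).mp hi
    exact ⟨q, hq, hk, by omega, by omega⟩

-- ===== A-side: A = canon =====
lemma A_eq_canon (nums : List Int) (key k : Int) :
    findKDistantIndices nums key k = canon nums key k := by
  unfold findKDistantIndices
  obtain ⟨hnodup, hmem⟩ :=
    foldA_spec key k (nums.length : Int) (PySem.List.enumerate nums 0) PySem.Set.empty List.nodup_nil
  apply PySem.List.sorted_eq_of_perm_of_pairwise_lt
  · refine (List.perm_ext_iff_of_nodup (nodup_canon nums key k) hnodup).mpr fun j => ?_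
    rw [mem_canon, hmem j]
    simp only [PySem.Set.empty, List.not_mem_nil, false_or]
    exact (cond_iff nums key k j).symm
  · exact pairwise_canon nums key k

-- ===== B-side =====
lemma bAdvance_le (pos : List Int) (t : Int) :
    ∀ p, p ≤ pos.length → bAdvance pos t p ≤ pos.length := by
  intro p
  fun_induction bAdvance pos t p with
  | case1 p h hlt ih => intro _; exact ih (by omega)
  | case2 p h hlt => intro hp; exact hp
  | case3 p h => intro hp; exact hp

lemma drop_bAdvance (pos : List Int) (t : Int) :
    ∀ p, pos.drop (bAdvance pos t p) = (pos.drop p).dropWhile (fun i => decide (i < t)) := by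
  intro p
  fun_induction bAdvance pos t p with
  | case1 p h hlt ih =>
    rw [ih, List.drop_eq_getElem_cons h, List.dropWhile_cons]
    simp [hlt]
  | case2 p h hlt =>
    rw [List.drop_eq_getElem_cons h, List.dropWhile_cons]
    simp [hlt]
  | case3 p h =>
    have : pos.drop p = [] := List.drop_eq_nil_of_le (by omega)
    simp [this]

lemma dropWhile_dropWhile_mono {l : List Int} {p q : Int → Bool}
    (h : ∀ x, q x = true → p x = true) : (l.dropWhile q).dropWhile p = l.dropWhile p := by
  induction l with
  | nil => rfl
  | cons x xs ih =>
    by_cases hq : q x = true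
    · simp [hq, h x hq, ih]
    · simp [List.dropWhile_cons, hq]

-- the emission test of B is exactly the 'near' predicate, given sorted positions
lemma emit_iff (pos : List Int) (hsorted : pos.Pairwise (· ≤ ·)) (k a : Int) (p : Nat)
    (hdrop : pos.drop p = pos.dropWhile (fun i => decide (i < a - k))) :
    ((p < pos.length) ∧ ∀ (h : p < pos.length), pos[p] ≤ a + k) ↔ near pos k a = true := by
  rw [near_iff]
  constructor
  · rintro ⟨hp, hle⟩
    refine ⟨pos[p], List.getElem_mem hp, ?_, hle hp⟩
    have hcons : pos.dropWhile (fun i => decide (i < a - k)) = pos[p] :: pos.drop (p+1) := by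
      rw [← hdrop]; exact List.drop_eq_getElem_cons hp
    have hhead := List.head?_dropWhile_not (fun i => decide (i < a - k)) pos
    rw [hcons] at hhead
    simp only [List.head?_cons] at hhead
    have h2 : decide (pos[p] < a - k) = false := hhead
    simp at h2
    omega
  · rintro ⟨i, hi, h1, h2⟩
    have hsplit : pos.takeWhile (fun i => decide (i < a - k)) ++
        pos.dropWhile (fun i => decide (i < a - k)) = pos := List.takeWhile_append_dropWhile
    have hiD : i ∈ pos.dropWhile (fun i => decide (i < a - k)) := by
      rcases List.mem_append.mp (by rw [hsplit]; exact hi) with hmem | hmem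
      · have := List.mem_takeWhile_imp hmem; simp at this; omega
      · exact hmem
    have hne : pos.drop p ≠ [] := by
      rw [hdrop]; intro hnil; rw [hnil] at hiD; exact absurd hiD List.not_mem_nil
    have hp : p < pos.length := by
      by_contra hc
      exact hne (List.drop_eq_nil_of_le (by omega))
    refine ⟨hp, fun _ => ?_⟩
    -- pos[p] is the head of the remaining suffix, hence ≤ i ≤ a + k
    have hcons : pos.drop p = pos[p] :: pos.drop (p+1) := List.drop_eq_getElem_cons hp
    have hpw : (pos.drop p).Pairwise (· ≤ ·) := hsorted.sublist (List.drop_sublist p pos)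
    rw [hcons] at hpw
    have hiD' : i ∈ pos[p] :: pos.drop (p+1) := by rw [← hcons, hdrop]; exact hiD
    rcases List.mem_cons.mp hiD' with rfl | hmem
    · exact h2
    · exact le_trans ((List.pairwise_cons.mp hpw).1 i hmem) h2

-- B's loop body, named for the proofs (definitionally the lambda in findKDistantIndices_alt)
def bStep (pos : List Int) (k : Int) (st : Nat × List Int) (j : Int) : Nat × List Int :=
  let p := bAdvance pos (j - k) st.1
  if h : p < pos.length then
    if pos[p] ≤ j + k then (p, st.2 ++ [j]) else (p, st.2)
  else (p, st.2)

-- the main loop invariant of B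
lemma bLoop (pos : List Int) (hsorted : pos.Pairwise (· ≤ ·)) (k n : Int) :
    ∀ (cnt : Nat) (a : Int) (p : Nat) (res : List Int),
      (n - a).toNat = cnt → p ≤ pos.length →
      (pos.drop p).dropWhile (fun i => decide (i < a - k))
        = pos.dropWhile (fun i => decide (i < a - k)) →
      ((PySem.List.pyRange a n 1).foldl (bStep pos k) (p, res)).2
        = res ++ (PySem.List.pyRange a n 1).filter (near pos k) := by
  intro cnt
  induction cnt with
  | zero =>
    intro a p res hcnt _ _
    rw [PySem.List.pyRange_one_eq_nil (by omega)]
    simp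
  | succ m ih =>
    intro a p res hcnt hp hinv
    have ha : a < n := by omega
    have hm' : (n - (a + 1)).toNat = m := by omega
    have hdrop' : pos.drop (bAdvance pos (a - k) p)
        = pos.dropWhile (fun i => decide (i < a - k)) := by
      rw [drop_bAdvance, hinv]
    have hp'le : bAdvance pos (a - k) p ≤ pos.length := bAdvance_le pos (a - k) p hp
    have hiff := emit_iff pos hsorted k a (bAdvance pos (a - k) p) hdrop'
    have hinv' : (pos.drop (bAdvance pos (a - k) p)).dropWhile (fun i => decide (i < (a + 1) - k))
        = pos.dropWhile (fun i => decide (i < (a + 1) - k)) := by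
      rw [hdrop']
      exact dropWhile_dropWhile_mono (by intro x hx; simp at hx ⊢; omega)
    have hrec := fun res' => ih (a + 1) (bAdvance pos (a - k) p) res' hm' hp'le hinv'
    rw [PySem.List.pyRange_one_cons ha, List.foldl_cons, List.filter_cons]
    by_cases hnear : near pos k a = true
    · obtain ⟨h1, h2⟩ := hiff.mpr hnear
      have hb : bStep pos k (p, res) a = (bAdvance pos (a - k) p, res ++ [a]) := by
        simp only [bStep]
        rw [dif_pos h1, if_pos (h2 h1)]
      rw [hb, hnear, if_pos rfl, hrec (res ++ [a]), List.append_assoc, List.cons_append,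
        List.nil_append]
    · have hb : bStep pos k (p, res) a = (bAdvance pos (a - k) p, res) := by
        simp only [bStep]
        by_cases h1 : bAdvance pos (a - k) p < pos.length
        · have h2 : ¬ pos[bAdvance pos (a - k) p] ≤ a + k := fun hc => hnear (hiff.mp ⟨h1, fun _ => hc⟩)
          rw [dif_pos h1, if_neg h2]
        · rw [dif_neg h1]
      rw [Bool.not_eq_true] at hnear
      rw [hb, hnear, if_neg (by simp), hrec res]

lemma B_eq_canon (nums : List Int) (key k : Int) :
    findKDistantIndices_alt nums key k = canon nums key k := by
  have hsorted : (posOf nums key).Pairwise (· ≤ ·) :=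
    (pairwise_lt_posOf nums key).imp (fun h => le_of_lt h)
  have h := bLoop (posOf nums key) hsorted k (nums.length : Int)
    nums.length 0 0 [] (by omega) (Nat.zero_le _) (by rw [List.drop_zero])
  show ((PySem.List.pyRange 0 (nums.length : Int) 1).foldl
      (bStep (posOf nums key) k) (0, ([] : List Int))).2 = canon nums key k
  rw [h, List.nil_append]
  rfl

-- ===== VERDICT (by name: the statement is the Claim_ definition above) =====
theorem findKDistantIndices_spec : Claim_equal_findKDistantIndices := by
  intro nums key k _
  unfold Spec_findKDistantIndices
  rw [A_eq_canon, B_eq_canon]
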